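-- pv_equiv track=rewrite | github.com/SOROKKIM/algorithm | 백준/Bronze/2581. 소수/소수.py | find_prime_sum_and_min
-- ===== SOURCE A (Python) =====
-- def sieve_of_eratosthenes(limit):
--     is_prime = [True] * (limit + 1)
--     is_prime[0] = is_prime[1] = False
--
--     for i in range(2, int(limit ** 0.5) + 1):
--         if is_prime[i]:
--             for j in range(i * i, limit + 1, i):
--                 is_prime[j] = False
--
--     return [num for num in range(2, limit + 1) if is_prime[num]]
--
-- def find_prime_sum_and_min(M, N):
--     # M 이상 N 이하의 범위 내에서 소수 찾기
--     primes = sieve_of_eratosthenes(N)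
--
--     # M 이상 N 이하의 소수들만 남기기
--     primes = [prime for prime in primes if prime >= M]
--
--     if not primes:
--         return -1, -1
--     prime_sum = sum(primes)
--     min_prime = min(primes)
--
--     return prime_sum, min_prime
-- ===== SOURCE B (Python) =====
-- def find_prime_sum_and_min(M, N):
--     primes = []
--     for num in range(2, N + 1):
--         is_p = True
--         for p in primes:
--             if p * p > num:
--                 break
--             if num % p == 0:
--                 is_p = False
--                 break
--         if is_p:
--             primes.append(num)
--     total = 0
--     first = -1
--     for p in primes:
--         if p >= M:
--             total += p
--             if first == -1:
--                 first = p
--     if first == -1: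
--         return -1, -1
--     return total, first
-- ===== Notes on version B (the rewrite author's own statement) =====
-- stated objective: alternative
-- what changed: Replaces the boolean sieve array (mark multiples of each surviving index, then collect unmarked indices) by incremental trial division: scan 2..N once, keeping a growing list of primes and testing each number only against the stored primes p with p*p <= num (early break), then accumulate the sum and the first prime >= M in one pass instead of A's filter/sum/min passes.
-- outside the precondition, e.g. on find_prime_sum_and_min(2, 0): A raises IndexError, B returns (-1, -1)
import Mathlib
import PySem

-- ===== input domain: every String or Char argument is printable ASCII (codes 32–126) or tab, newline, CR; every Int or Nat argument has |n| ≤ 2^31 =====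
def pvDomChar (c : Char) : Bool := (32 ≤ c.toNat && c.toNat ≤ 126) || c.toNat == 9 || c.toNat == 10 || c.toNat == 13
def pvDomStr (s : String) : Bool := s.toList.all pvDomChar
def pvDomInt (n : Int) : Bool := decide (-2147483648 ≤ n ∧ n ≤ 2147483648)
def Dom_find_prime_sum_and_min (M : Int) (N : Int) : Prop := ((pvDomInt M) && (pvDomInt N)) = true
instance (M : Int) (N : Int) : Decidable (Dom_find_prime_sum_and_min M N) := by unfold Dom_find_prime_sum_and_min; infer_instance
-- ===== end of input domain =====

-- B replaces A's sieve array and its three post-passes (filter ≥ M, sum, min) by incremental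
-- trial division against the primes found so far, plus one accumulating pass for sum and minimum.

-- ===== PORT A =====
-- Python: sieve_of_eratosthenes(limit).  The Python list of booleans is ported as Array Bool;
-- the assignments is_prime[0] = is_prime[1] = False raise IndexError when limit ≤ 0
-- (setIfInBounds is a no-op there; Pre_ below excludes those inputs), all other reads/writes
-- are in range, so setIfInBounds/[·]?.getD are exact, and every written index j satisfies
-- j ≥ i*i ≥ 0, so j.toNat is exact.  int(limit ** 0.5) is ⌊√limit⌋ (= Nat.sqrt) or, for limit
-- just below a perfect square, ⌊√limit⌋+1; the possible extra outer iteration has an empty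
-- inner range, so the returned list is identical.
def sieve_of_eratosthenes (limit : Int) : List Int :=
  let isp : Array Bool :=
    ((Array.replicate (limit + 1).toNat true).setIfInBounds 0 false).setIfInBounds 1 false
  let isp := (PySem.List.pyRange 2 ((Nat.sqrt limit.toNat : Int) + 1) 1).foldl
    (fun a i =>
      if (a[i.toNat]?).getD false then
        (PySem.List.pyRange (i * i) (limit + 1) i).foldl
          (fun l j => l.setIfInBounds j.toNat false) a
      else a) isp
  (PySem.List.pyRange 2 (limit + 1) 1).filter (fun num => (isp[num.toNat]?).getD false)

def find_prime_sum_and_min (M : Int) (N : Int) : Int × Int :=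
  let primes := sieve_of_eratosthenes N
  let primes := primes.filter (fun prime => decide (M ≤ prime))
  if primes.isEmpty then (-1, -1)
  else
    -- min(primes): the branch guarantees primes ≠ [], so min? is some; the default is unreachable
    (primes.foldl (· + ·) 0, (PySem.List.min? primes (fun x => x)).getD 0)

-- ===== PORT B =====
-- the inner 'for p in primes: … break' loop of Source B (primes, a Python list, is ported as Array Int)
def scan_primes (num : Int) (ps : Array Int) (i : Nat) : Bool :=
  if h : i < ps.size then
    if ps[i] * ps[i] > num then true
    else if PySem.Int.mod num ps[i] == 0 then false
    else scan_primes num ps (i + 1)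
  else true
termination_by ps.size - i

def find_prime_sum_and_min_alt (M : Int) (N : Int) : Int × Int :=
  let primes := (PySem.List.pyRange 2 (N + 1) 1).foldl
    (fun ps num => if scan_primes num ps 0 then ps.push num else ps) (#[] : Array Int)
  let r := primes.foldl
    (fun acc p => if M ≤ p then (acc.1 + p, if acc.2 == -1 then p else acc.2) else acc)
    ((0 : Int), (-1 : Int))
  if r.2 == -1 then (-1, -1) else (r.1, r.2)

-- ===== PRECONDITION & SPEC =====
-- A raises IndexError for N ≤ 0 (its sieve list [True]*(N+1) has no index 1); Pre_ excludes
-- exactly those inputs (B returns (-1, -1) there).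
def Pre_find_prime_sum_and_min (M : Int) (N : Int) : Prop := 1 ≤ N
instance (M : Int) (N : Int) : Decidable (Pre_find_prime_sum_and_min M N) := by unfold Pre_find_prime_sum_and_min; infer_instance
def pvWitness_find_prime_sum_and_min : Int × Int := (1, 10)

def Spec_find_prime_sum_and_min (M : Int) (N : Int) (out : Int × Int) : Prop := out = find_prime_sum_and_min_alt M N
instance (M : Int) (N : Int) (out : Int × Int) : Decidable (Spec_find_prime_sum_and_min M N out) := by unfold Spec_find_prime_sum_and_min; infer_instance

-- ===== CLAIM (what is proved, stated in full; the proofs are below) =====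
def Claim_equal_find_prime_sum_and_min : Prop := ∀ (M : Int) (N : Int), Dom_find_prime_sum_and_min M N → Pre_find_prime_sum_and_min M N → Spec_find_prime_sum_and_min M N (find_prime_sum_and_min M N)

-- ===== LEMMAS AND PROOFS =====

-- the primality specification both programs are measured against
def primeB (x : Int) : Bool := decide (2 ≤ x ∧ Nat.Prime x.toNat)

lemma dvd_toNat {p c : Int} (hp : 0 ≤ p) (hc : 0 ≤ c) (h : p ∣ c) : p.toNat ∣ c.toNat :=
  Int.ofNat_dvd.mp (by rwa [Int.toNat_of_nonneg hp, Int.toNat_of_nonneg hc])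

lemma dvd_of_toNat {p c : Int} (hp : 0 ≤ p) (hc : 0 ≤ c) (h : p.toNat ∣ c.toNat) : p ∣ c := by
  have := Int.ofNat_dvd.mpr h
  rwa [Int.toNat_of_nonneg hp, Int.toNat_of_nonneg hc] at this

lemma exists_small_prime_factor {m : Nat} (h2 : 2 ≤ m) (hnp : ¬ m.Prime) :
    ∃ p : Nat, p.Prime ∧ p ∣ m ∧ p * p ≤ m := by
  refine ⟨m.minFac, Nat.minFac_prime (by omega), Nat.minFac_dvd m, ?_⟩
  have h := Nat.minFac_sq_le_self (by omega) hnp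
  rwa [pow_two] at h

lemma prime_marked_iff (m : Nat) (hm : 2 ≤ m) :
    (m < 2 ∨ ∃ p : Nat, p.Prime ∧ p ∣ m ∧ p * p ≤ m) ↔ ¬ m.Prime := by
  constructor
  · rintro (h | ⟨p, hp, hdvd, hsq⟩)
    · omega
    · intro hmp
      have hpm : p = m := (Nat.prime_dvd_prime_iff_eq hp hmp).mp hdvd
      subst hpm
      nlinarith [hp.two_le]
  · intro h
    exact Or.inr (exists_small_prime_factor hm h)

lemma pyRange_one_pairwise (a b : Int) : (PySem.List.pyRange a b 1).Pairwise (· < ·) := by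
  rw [PySem.List.pyRange_of_pos a b one_pos, List.pairwise_map]
  exact List.pairwise_lt_range.imp (by intro k k' h; omega)

-- ===== A-side: the marking pass and the sieve invariant =====

lemma foldl_set_size (R : List Int) (a : Array Bool) :
    (R.foldl (fun l j => l.setIfInBounds j.toNat false) a).size = a.size := by
  induction R generalizing a with
  | nil => rfl
  | cons j R ih => rw [List.foldl_cons, ih, Array.size_setIfInBounds]

lemma foldl_set_get (R : List Int) (a : Array Bool) (hR : ∀ j ∈ R, 0 ≤ j) (m : Nat)
    (hm : m < a.size) :
    ((R.foldl (fun l j => l.setIfInBounds j.toNat false) a)[m]?).getD false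
      = if (m : Int) ∈ R then false else (a[m]?).getD false := by
  induction R generalizing a with
  | nil => simp
  | cons j R ih =>
    rw [List.foldl_cons, ih _ (fun x hx => hR x (List.mem_cons_of_mem j hx))
      (by simpa using hm)]
    have hj : 0 ≤ j := hR j List.mem_cons_self
    by_cases hmem : (m : Int) ∈ R
    · simp [hmem]
    · by_cases hjm : j = (m : Int)
      · have hjt : j.toNat = m := by omega
        rw [if_pos (List.mem_cons.mpr (Or.inl hjm.symm))]
        simp [hjt, hm]
      · have hjt : j.toNat ≠ m := by omega
        rw [if_neg hmem,
          if_neg (fun hmm => (List.mem_cons.mp hmm).elim (fun hh => hjm hh.symm) hmem),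
          Array.getElem?_setIfInBounds, if_neg hjt]

-- loop invariant of A's outer sieve pass: marked entries are exactly the m with a prime
-- factor p < i whose square does not exceed m (plus the two seeded cells 0 and 1)
def SieveInv (n : Nat) (i : Int) (a : Array Bool) : Prop :=
  a.size = n + 1 ∧ ∀ m : Nat, m ≤ n →
    ((a[m]?).getD false = false ↔ m < 2 ∨ ∃ p : Nat, p.Prime ∧ (p : Int) < i ∧ p ∣ m ∧ p * p ≤ m)

def sieveStep (n : Nat) : Array Bool → Int → Array Bool := fun a i =>
  if (a[i.toNat]?).getD false then
    (PySem.List.pyRange (i * i) ((n : Int) + 1) i).foldl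
      (fun l j => l.setIfInBounds j.toNat false) a
  else a

lemma unmarked_iff_prime {n : Nat} {i : Int} {a : Array Bool} (h : SieveInv n i a)
    (h2 : 2 ≤ i) (hin : i.toNat ≤ n) :
    (a[i.toNat]?).getD false = true ↔ Nat.Prime i.toNat := by
  have hfalse : (a[i.toNat]?).getD false = false ↔ ¬ Nat.Prime i.toNat := by
    rw [h.2 i.toNat hin]
    constructor
    · rintro (hlt | ⟨p, hp, -, hdvd, hsq⟩)
      · omega
      · exact (prime_marked_iff i.toNat (by omega)).mp (Or.inr ⟨p, hp, hdvd, hsq⟩)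
    · intro hnp
      obtain ⟨p, hp, hdvd, hsq⟩ := exists_small_prime_factor (m := i.toNat) (by omega) hnp
      have hp2 := hp.two_le
      have hpi : p < i.toNat := by nlinarith
      exact Or.inr ⟨p, hp, by omega, hdvd, hsq⟩
  rcases hb : (a[i.toNat]?).getD false with - | -
  · exact iff_of_false (by simp) (hfalse.mp hb)
  · exact iff_of_true rfl
      (of_not_not (fun hnp => by rw [hfalse.mpr hnp] at hb; exact Bool.noConfusion hb))

lemma sieve_step_inv (n : Nat) (i : Int) (a : Array Bool) (h2 : 2 ≤ i) (hin : i.toNat ≤ n)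
    (hInv : SieveInv n i a) : SieveInv n (i + 1) (sieveStep n a i) := by
  have hi0 : (i.toNat : Int) = i := Int.toNat_of_nonneg (by omega)
  unfold sieveStep
  by_cases hg : (a[i.toNat]?).getD false = true
  · rw [if_pos hg]
    have hiprime : Nat.Prime i.toNat := (unmarked_iff_prime hInv h2 hin).mp hg
    obtain ⟨hlen, hch⟩ := hInv
    have hR : ∀ j ∈ PySem.List.pyRange (i * i) ((n : Int) + 1) i, 0 ≤ j := by
      intro j hjmem
      have hj := (PySem.List.mem_pyRange_iff_of_pos (by omega) j).mp hjmem
      nlinarith [hj.1]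
    refine ⟨by rw [foldl_set_size]; exact hlen, ?_⟩
    intro m hm
    rw [foldl_set_get _ _ hR m (by omega)]
    by_cases hmem : (m : Int) ∈ PySem.List.pyRange (i * i) ((n : Int) + 1) i
    · obtain ⟨hlo, hhi, hdv⟩ := (PySem.List.mem_pyRange_iff_of_pos (by omega) _).mp hmem
      have hdvm : i ∣ (m : Int) := by
        have hsum : i ∣ ((m : Int) - i * i) + i * i := dvd_add hdv (dvd_mul_right i i)
        simpa using hsum
      simp only [if_pos hmem, true_iff]
      refine Or.inr ⟨i.toNat, hiprime, by omega, ?_, ?_⟩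
      · exact Int.ofNat_dvd.mp (by rwa [hi0])
      · have hsq : (i.toNat : Int) * i.toNat ≤ (m : Int) := by rwa [hi0]
        exact_mod_cast hsq
    · rw [if_neg hmem, hch m hm]
      constructor
      · rintro (h | ⟨p, hp, hlt, hdvd, hsq⟩)
        · exact Or.inl h
        · exact Or.inr ⟨p, hp, by omega, hdvd, hsq⟩
      · rintro (h | ⟨p, hp, hlt, hdvd, hsq⟩)
        · exact Or.inl h
        · rcases lt_or_eq_of_le (show (p : Int) ≤ i by omega) with hpi | hpi
          · exact Or.inr ⟨p, hp, hpi, hdvd, hsq⟩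
          · exfalso
            apply hmem
            have hpt : p = i.toNat := by omega
            subst hpt
            rw [PySem.List.mem_pyRange_iff_of_pos (by omega)]
            refine ⟨?_, by omega, ?_⟩
            · rw [← hi0]; exact_mod_cast hsq
            · have hdm : i ∣ (m : Int) := by
                rw [← hi0]; exact_mod_cast hdvd
              exact dvd_sub hdm (dvd_mul_right i i)
  · rw [if_neg hg]
    have hnp : ¬ Nat.Prime i.toNat := fun hp =>
      hg ((unmarked_iff_prime hInv h2 hin).mpr hp)
    obtain ⟨hlen, hch⟩ := hInv
    refine ⟨hlen, ?_⟩
    intro m hm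
    rw [hch m hm]
    constructor
    · rintro (h | ⟨p, hp, hlt, hdvd, hsq⟩)
      · exact Or.inl h
      · exact Or.inr ⟨p, hp, by omega, hdvd, hsq⟩
    · rintro (h | ⟨p, hp, hlt, hdvd, hsq⟩)
      · exact Or.inl h
      · rcases lt_or_eq_of_le (show (p : Int) ≤ i by omega) with hpi | hpi
        · exact Or.inr ⟨p, hp, hpi, hdvd, hsq⟩
        · exact absurd (by rwa [show p = i.toNat by omega] at hp) hnp

lemma sieve_outer (n : Nat) (c : Int) (a : Array Bool) (hc : 2 ≤ c) (hInv : SieveInv n c a) :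
    ∀ m : Nat, m ≤ n →
      ((((PySem.List.pyRange c ((Nat.sqrt n : Int) + 1) 1).foldl (sieveStep n) a)[m]?).getD false
          = false
        ↔ m < 2 ∨ ∃ p : Nat, p.Prime ∧ p ∣ m ∧ p * p ≤ m) := by
  intro m hm
  by_cases hcs : c < (Nat.sqrt n : Int) + 1
  · rw [PySem.List.pyRange_one_cons hcs, List.foldl_cons]
    have hin : c.toNat ≤ n := by
      have h1 : c.toNat ≤ Nat.sqrt n := by omega
      exact le_trans h1 (Nat.sqrt_le_self n)
    exact sieve_outer n (c + 1) _ (by omega) (sieve_step_inv n c a hc hin hInv) m hm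
  · have hnil : PySem.List.pyRange c ((Nat.sqrt n : Int) + 1) 1 = [] := by
      rw [PySem.List.pyRange_of_pos _ _ one_pos]
      simp [hcs]
    rw [hnil, List.foldl_nil, hInv.2 m hm]
    constructor
    · rintro (h | ⟨p, hp, -, hdvd, hsq⟩)
      · exact Or.inl h
      · exact Or.inr ⟨p, hp, hdvd, hsq⟩
    · rintro (h | ⟨p, hp, hdvd, hsq⟩)
      · exact Or.inl h
      · refine Or.inr ⟨p, hp, ?_, hdvd, hsq⟩
        have hpm : p ≤ Nat.sqrt n := Nat.le_sqrt.mpr (le_trans hsq hm)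
        omega
termination_by ((Nat.sqrt n : Int) + 1 - c).toNat
decreasing_by omega

lemma sieve_init (n : Nat) :
    SieveInv n 2 (((Array.replicate (n + 1) true).setIfInBounds 0 false).setIfInBounds 1 false) := by
  refine ⟨by simp, ?_⟩
  intro m hm
  have hno : ¬ ∃ p : Nat, p.Prime ∧ (p : Int) < 2 ∧ p ∣ m ∧ p * p ≤ m := by
    rintro ⟨p, hp, hlt, -, -⟩
    have := hp.two_le
    omega
  rcases m with - | m
  · simp
  · rcases m with - | m
    · simp [show 0 < n by omega]
    · rw [Array.getElem?_setIfInBounds, if_neg (show ¬((1 : Nat) = m + 2) by omega),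
        Array.getElem?_setIfInBounds, if_neg (show ¬((0 : Nat) = m + 2) by omega),
        Array.getElem?_replicate, if_pos (show m + 2 < n + 1 by omega)]
      exact iff_of_false (by simp)
        (by rintro (hh | hh)
            · omega
            · exact hno hh)

-- A's sieve output is the primality filter of range(2, limit+1)
lemma sieve_eq_filter (n : Nat) :
    sieve_of_eratosthenes (n : Int)
      = (PySem.List.pyRange 2 ((n : Int) + 1) 1).filter primeB := by
  unfold sieve_of_eratosthenes
  simp only [Int.toNat_natCast, show ((n : Int) + 1).toNat = n + 1 by omega]
  apply List.filter_congr
  intro num hnum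
  obtain ⟨h2, hlt⟩ := PySem.List.mem_pyRange_one.mp hnum
  have hmn : num.toNat ≤ n := by omega
  show (((PySem.List.pyRange 2 ((Nat.sqrt n : Int) + 1) 1).foldl (sieveStep n)
      (((Array.replicate (n + 1) true).setIfInBounds 0 false).setIfInBounds 1 false))[num.toNat]?).getD
        false
    = primeB num
  have hmarks := sieve_outer n 2 _ (by omega) (sieve_init n) num.toNat hmn
  have hmark2 : ((((PySem.List.pyRange 2 ((Nat.sqrt n : Int) + 1) 1).foldl (sieveStep n)
      (((Array.replicate (n + 1) true).setIfInBounds 0 false).setIfInBounds 1 false))[num.toNat]?).getD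
        false = false)
      ↔ ¬ Nat.Prime num.toNat := by
    rw [hmarks, prime_marked_iff num.toNat (by omega)]
  by_cases hp : Nat.Prime num.toNat
  · have hb : primeB num = true := by simp [primeB, h2, hp]
    rw [hb]
    rcases hbm : ((((PySem.List.pyRange 2 ((Nat.sqrt n : Int) + 1) 1).foldl (sieveStep n)
        (((Array.replicate (n + 1) true).setIfInBounds 0 false).setIfInBounds 1 false))[num.toNat]?).getD
          false) with - | -
    · exact absurd hp (hmark2.mp hbm)
    · rfl
  · have hb : primeB num = false := by simp [primeB, hp]
    rw [hb]
    exact hmark2.mpr hp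

-- ===== B-side: the trial-division scan and the growing prime list =====

-- the scan is decided by the stored primes p with p*p ≤ num (the break is sound on a sorted list)
lemma scan_primes_iff (num : Int) (ps : Array Int) (hpos : ∀ p ∈ ps.toList, 0 < p)
    (hsorted : ps.toList.Pairwise (· ≤ ·)) (i : Nat) :
    (scan_primes num ps i = true ↔ ∀ p ∈ ps.toList.drop i, p * p ≤ num → ¬ p ∣ num) := by
  by_cases h : i < ps.size
  · have hdrop : ps.toList.drop i = ps[i] :: ps.toList.drop (i + 1) := by
      rw [List.drop_eq_getElem_cons (by simpa using h), Array.getElem_toList]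
    have hmemi : ps[i] ∈ ps.toList := by
      rw [← Array.getElem_toList (by simpa using h)]
      exact List.getElem_mem _
    have hlater : ∀ p ∈ ps.toList.drop (i + 1), ps[i] ≤ p := by
      have hpw : (ps.toList.drop i).Pairwise (· ≤ ·) := hsorted.drop
      rw [hdrop] at hpw
      exact (List.pairwise_cons.mp hpw).1
    rw [scan_primes, dif_pos h]
    by_cases hgt : ps[i] * ps[i] > num
    · rw [if_pos hgt]
      refine iff_of_true rfl ?_
      rw [hdrop]
      rintro p hp hsq
      rcases List.mem_cons.mp hp with rfl | hp'
      · omega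
      · have h1 : ps[i] ≤ p := hlater p hp'
        have h0 : 0 < ps[i] := hpos _ hmemi
        nlinarith
    · rw [if_neg hgt]
      by_cases hdvd : PySem.Int.mod num ps[i] == 0
      · rw [if_pos hdvd]
        refine iff_of_false (by simp) ?_
        intro hall
        exact hall ps[i] (hdrop ▸ List.mem_cons_self) (by omega)
          ((PySem.Int.mod_eq_zero_iff_dvd num ps[i]).mp (beq_iff_eq.mp hdvd))
      · rw [if_neg hdvd, scan_primes_iff num ps hpos hsorted (i + 1), hdrop]
        constructor
        · intro hall p hp hsq hpd
          rcases List.mem_cons.mp hp with rfl | hp'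
          · exact hdvd (beq_iff_eq.mpr ((PySem.Int.mod_eq_zero_iff_dvd num _).mpr hpd))
          · exact hall p hp' hsq hpd
        · intro hall p hp hsq hpd
          exact hall p (List.mem_cons_of_mem _ hp) hsq hpd
  · rw [scan_primes, dif_neg h]
    refine iff_of_true rfl ?_
    rw [List.drop_eq_nil_of_le (by simpa using not_lt.mp h)]
    rintro p ⟨⟩
termination_by ps.size - i
decreasing_by omega

-- when ps holds exactly the primes below c, the scan decides primality of c
lemma scan_decides (c : Int) (hc : 2 ≤ c) (ps : Array Int)
    (hps : ps.toList = (PySem.List.pyRange 2 c 1).filter primeB) :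
    (scan_primes c ps 0 = true ↔ primeB c = true) := by
  have hsub : ∀ p ∈ ps.toList, 2 ≤ p ∧ p < c ∧ Nat.Prime p.toNat := by
    intro p hp
    rw [hps, List.mem_filter] at hp
    obtain ⟨hmr, hpb⟩ := hp
    obtain ⟨h2, hlt⟩ := PySem.List.mem_pyRange_one.mp hmr
    exact ⟨h2, hlt, (of_decide_eq_true hpb).2⟩
  have hpos : ∀ p ∈ ps.toList, 0 < p := fun p hp => by have := (hsub p hp).1; omega
  have hsorted : ps.toList.Pairwise (· ≤ ·) := by
    rw [hps]
    exact ((pyRange_one_pairwise 2 c).filter _).imp le_of_lt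
  rw [scan_primes_iff c ps hpos hsorted 0, List.drop_zero]
  constructor
  · intro hall
    have hpr : Nat.Prime c.toNat := by
      by_contra hnp
      obtain ⟨p, hp, hdvd, hsq⟩ := exists_small_prime_factor (m := c.toNat) (by omega) hnp
      have hp2 := hp.two_le
      have hplt : p < c.toNat := by nlinarith
      have hmem : (p : Int) ∈ ps.toList := by
        rw [hps, List.mem_filter]
        refine ⟨PySem.List.mem_pyRange_one.mpr ⟨by exact_mod_cast hp2, by omega⟩, ?_⟩
        simp only [primeB, decide_eq_true_eq, Int.toNat_natCast]
        exact ⟨by exact_mod_cast hp2, hp⟩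
      refine hall (p : Int) hmem ?_ ?_
      · have : ((p * p : Nat) : Int) ≤ ((c.toNat : Nat) : Int) := by exact_mod_cast hsq
        push_cast at this
        omega
      · exact dvd_of_toNat (by omega) (by omega) (by simpa using hdvd)
    simp [primeB, hc, hpr]
  · intro hpb p hpmem hsq hdvd
    have hpr : Nat.Prime c.toNat := (of_decide_eq_true hpb).2
    obtain ⟨hp2, hplt, hppr⟩ := hsub p hpmem
    have heq : p.toNat = c.toNat :=
      (Nat.prime_dvd_prime_iff_eq hppr hpr).mp (dvd_toNat (by omega) (by omega) hdvd)
    omega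

-- the build pass keeps the list of primes found so far
lemma build_inv_aux (b : Int) (k : Nat) : ∀ (c : Int) (ps : Array Int), (b - c).toNat ≤ k →
    2 ≤ c → c ≤ b → ps.toList = (PySem.List.pyRange 2 c 1).filter primeB →
    ((PySem.List.pyRange c b 1).foldl
        (fun ps num => if scan_primes num ps 0 then ps.push num else ps) ps).toList
      = (PySem.List.pyRange 2 b 1).filter primeB := by
  induction k with
  | zero =>
    intro c ps hk hc hcb hps
    have hcb' : c = b := by omega
    subst hcb'
    have hnil : PySem.List.pyRange c c 1 = [] := by
      rw [PySem.List.pyRange_of_pos _ _ one_pos]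
      simp
    rw [hnil, List.foldl_nil, hps]
  | succ k ih =>
    intro c ps hk hc hcb hps
    by_cases hlt : c < b
    · rw [PySem.List.pyRange_one_cons hlt, List.foldl_cons]
      have hsucc : (PySem.List.pyRange 2 (c + 1) 1).filter primeB
          = (PySem.List.pyRange 2 c 1).filter primeB
            ++ (if primeB c then [c] else []) := by
        rw [PySem.List.pyRange_one_succ_right hc, List.filter_append, List.filter_singleton]
        cases primeB c <;> simp
      have hiff := scan_decides c hc ps hps
      by_cases hs : scan_primes c ps 0 = true
      · rw [if_pos hs]
        refine ih (c + 1) _ (by omega) (by omega) (by omega) ?_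
        rw [Array.toList_push, hps, hsucc, hiff.mp hs]
        simp
      · rw [if_neg hs]
        refine ih (c + 1) _ (by omega) (by omega) (by omega) ?_
        have hb : primeB c = false := by
          rcases hbv : primeB c with - | -
          · rfl
          · exact absurd (hiff.mpr hbv) hs
        rw [hps, hsucc, hb]
        simp
    · have hcb' : c = b := by omega
      subst hcb'
      have hnil : PySem.List.pyRange c c 1 = [] := by
        rw [PySem.List.pyRange_of_pos _ _ one_pos]
        simp
      rw [hnil, List.foldl_nil, hps]

lemma build_inv (b : Int) (c : Int) (ps : Array Int) (hc : 2 ≤ c) (hcb : c ≤ b)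
    (hps : ps.toList = (PySem.List.pyRange 2 c 1).filter primeB) :
    ((PySem.List.pyRange c b 1).foldl
        (fun ps num => if scan_primes num ps 0 then ps.push num else ps) ps).toList
      = (PySem.List.pyRange 2 b 1).filter primeB :=
  build_inv_aux b (b - c).toNat c ps le_rfl hc hcb hps

-- ===== the two accumulating tails =====

-- B's sum/first pass equals sum and head of the (≥ M)-filtered list
lemma pairFold (M : Int) (L : List Int) (hpos : ∀ x ∈ L, 0 ≤ x) : ∀ (s o : Int),
    (o = -1 ∨ 0 ≤ o) →
    L.foldl (fun acc p => if M ≤ p then (acc.1 + p, if acc.2 == -1 then p else acc.2) else acc)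
        (s, o)
      = ((L.filter (fun p => decide (M ≤ p))).foldl (· + ·) s,
         if o = -1 then ((L.filter (fun p => decide (M ≤ p))).head?).getD (-1) else o) := by
  induction L with
  | nil =>
    intro s o ho
    rcases ho with rfl | ho
    · simp
    · simp [show ¬ (o = -1) by omega]
  | cons x xs ih =>
    intro s o ho
    have hx0 : 0 ≤ x := hpos x List.mem_cons_self
    have hxs := fun y hy => hpos y (List.mem_cons_of_mem x hy)
    rw [List.foldl_cons, List.filter_cons]
    by_cases hMx : M ≤ x
    · rw [if_pos (show (decide (M ≤ x)) = true by simpa using hMx)]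
      rw [if_pos hMx]
      rcases ho with rfl | ho
      · rw [show (if ((-1 : Int) == -1) then x else (-1 : Int)) = x by simp,
          ih hxs (s + x) x (Or.inr hx0), if_neg (show ¬ (x = -1) by omega), if_pos rfl]
        simp
      · have hne : ¬ (o = -1) := by omega
        rw [show (if (o == -1) then x else o) = o by
            simp [beq_eq_false_iff_ne.mpr hne],
          ih hxs (s + x) o (Or.inr ho), if_neg hne, if_neg hne, List.foldl_cons]
    · rw [if_neg (show ¬ (decide (M ≤ x)) = true by simpa using hMx)]
      rw [if_neg hMx]
      exact ih hxs s o ho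

lemma min?_eq_head {x : Int} {xs : List Int} (h : ∀ y ∈ xs, x ≤ y) :
    PySem.List.min? (x :: xs) (fun z => z) = some x := by
  unfold PySem.List.min?
  rw [List.foldl_cons]
  induction xs with
  | nil => rfl
  | cons y ys ih =>
    rw [List.foldl_cons]
    have hxy : ¬ (y < x) := not_lt.mpr (h y List.mem_cons_self)
    simp only [hxy, ite_false]
    exact ih (fun z hz => h z (List.mem_cons_of_mem y hz))

-- ascending list of values ≥ 2: A's empty-check/sum/min tail equals B's sentinel tail
lemma final_assemble (L : List Int) (hpw : L.Pairwise (· < ·)) (h2 : ∀ x ∈ L, 2 ≤ x) :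
    (if L.isEmpty then ((-1 : Int), (-1 : Int))
     else (L.foldl (· + ·) 0, (PySem.List.min? L (fun x => x)).getD 0))
    = (if ((L.head?).getD (-1) == -1) then ((-1 : Int), (-1 : Int))
       else (L.foldl (· + ·) 0, (L.head?).getD (-1))) := by
  cases L with
  | nil => rfl
  | cons x xs =>
    have hx2 : 2 ≤ x := h2 x List.mem_cons_self
    have hmin : PySem.List.min? (x :: xs) (fun z => z) = some x :=
      min?_eq_head (fun y hy => le_of_lt ((List.pairwise_cons.mp hpw).1 y hy))
    simp [hmin, show (x == -1) = false by rw [beq_eq_false_iff_ne]; omega]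

-- ===== VERDICT (by name: the statement is the Claim_ definition above) =====
theorem find_prime_sum_and_min_spec : Claim_equal_find_prime_sum_and_min := by
  intro M N hdom hpre
  unfold Spec_find_prime_sum_and_min
  unfold Pre_find_prime_sum_and_min at hpre
  lift N to Nat using (by omega) with n
  simp only [find_prime_sum_and_min, find_prime_sum_and_min_alt]
  rw [sieve_eq_filter n, ← Array.foldl_toList,
    build_inv ((n : Int) + 1) 2 #[] (by omega) (by omega)
      (by rw [PySem.List.pyRange_of_pos _ _ one_pos]; simp)]
  have hF0 : ∀ x ∈ (PySem.List.pyRange 2 ((n : Int) + 1) 1).filter primeB, 0 ≤ x := by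
    intro x hx
    have := PySem.List.mem_pyRange_one.mp (List.mem_of_mem_filter hx)
    omega
  rw [pairFold M _ hF0 0 (-1) (Or.inl rfl), if_pos rfl]
  have hpw : (((PySem.List.pyRange 2 ((n : Int) + 1) 1).filter primeB).filter
      (fun p => decide (M ≤ p))).Pairwise (· < ·) :=
    ((pyRange_one_pairwise 2 ((n : Int) + 1)).filter _).filter _
  have h2 : ∀ x ∈ ((PySem.List.pyRange 2 ((n : Int) + 1) 1).filter primeB).filter
      (fun p => decide (M ≤ p)), 2 ≤ x := by
    intro x hx
    exact (PySem.List.mem_pyRange_one.mp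
      (List.mem_of_mem_filter (List.mem_of_mem_filter hx))).1
  exact final_assemble _ hpw h2
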